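-- pv_equiv track=rewrite | github.com/thekungfukid/amfoss-tasks | task-04/alchemyspinnacle.py | calculatesum
-- ===== SOURCE A (Python) =====
-- def calculatesum(num1,num2):
--     remainder1=0
--     remainder2=0
--     remainderdiff=0
--     sum=0
--     while True:
--         if num1==0:
--             remainder1=0
--         else:
--             remainder1=num1%10
--             num1=num1//10
--         if num2==0:
--             remainder2=0
--         else:
--             remainder2=num2%10
--             num2=num2//10
--
--         remainderdiff=abs(remainder1-remainder2)
--         sum=sum+remainderdiff
--
--         if num1==0 and num2==0:
--             break
--
--     return sum
-- ===== SOURCE B (Python) =====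
-- def calculatesum(num1, num2):
--     s1, s2 = str(num1), str(num2)
--     w = max(len(s1), len(s2))
--     return sum(abs(int(a) - int(b)) for a, b in zip(s1.zfill(w), s2.zfill(w)))
-- ===== Notes on version B (the rewrite author's own statement) =====
-- stated objective: idiomatic
-- what changed: Replaces the arithmetic remainder/quotient while-loop with string digit representations: both numbers are zfill-padded to equal width and the absolute digit differences are summed in one zip comprehension.
import Mathlib
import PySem

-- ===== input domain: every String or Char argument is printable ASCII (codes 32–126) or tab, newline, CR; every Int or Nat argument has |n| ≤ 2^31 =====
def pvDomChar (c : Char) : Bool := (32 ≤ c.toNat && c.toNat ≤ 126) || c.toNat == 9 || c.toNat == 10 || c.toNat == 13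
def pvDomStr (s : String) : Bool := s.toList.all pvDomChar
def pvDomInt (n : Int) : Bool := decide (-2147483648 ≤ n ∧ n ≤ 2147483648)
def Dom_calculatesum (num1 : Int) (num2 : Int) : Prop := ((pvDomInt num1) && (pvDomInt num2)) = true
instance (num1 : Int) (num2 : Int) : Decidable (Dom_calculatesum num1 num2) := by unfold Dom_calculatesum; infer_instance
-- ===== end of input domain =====

-- B replaces A's remainder/quotient while-loop by zfill-padded decimal strings zipped digit-wise (idiomatic).


-- ===== PORT A =====
-- A's `while True` loop; the fuel argument only totalizes it (on Pre_ the loop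
-- runs at most natAbs num1 + natAbs num2 + 1 times, so the fuel is never exhausted).
def calcLoop : Nat → Int → Int → Int → Int
  | 0, _, _, s => s
  | f + 1, num1, num2, s =>
    let r1 := if num1 == 0 then (0 : Int) else PySem.Int.mod num1 10
    let n1 := if num1 == 0 then num1 else PySem.Int.floordiv num1 10
    let r2 := if num2 == 0 then (0 : Int) else PySem.Int.mod num2 10
    let n2 := if num2 == 0 then num2 else PySem.Int.floordiv num2 10
    let s' := s + |r1 - r2|
    if n1 == 0 && n2 == 0 then s' else calcLoop f n1 n2 s'

def calculatesum (num1 : Int) (num2 : Int) : Int :=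
  calcLoop (num1.natAbs + num2.natAbs + 1) num1 num2 0

-- ===== PORT B =====
-- int(c) on a single decimal digit character is ported by hand as c.toNat - 48 (exact for '0'..'9').
def calculatesum_alt (num1 : Int) (num2 : Int) : Int :=
  let s1 := PySem.Int.toChars num1
  let s2 := PySem.Int.toChars num2
  let w : Int := max (s1.length : Int) (s2.length : Int)
  (((PySem.Chars.zfill s1 w).zip (PySem.Chars.zfill s2 w)).map
    (fun p => |((p.1.toNat : Int) - 48) - ((p.2.toNat : Int) - 48)|)).sum

-- ===== PRECONDITION & SPEC =====
-- A's while-loop never terminates when either argument is negative (num//10 stays at -1),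
-- so Pre_ admits exactly the inputs on which the Python A returns.
def Pre_calculatesum (num1 : Int) (num2 : Int) : Prop := 0 ≤ num1 ∧ 0 ≤ num2
instance (num1 : Int) (num2 : Int) : Decidable (Pre_calculatesum num1 num2) := by unfold Pre_calculatesum; infer_instance
def pvWitness_calculatesum : Int × Int := (907, 58)

def Spec_calculatesum (num1 : Int) (num2 : Int) (out : Int) : Prop := out = calculatesum_alt num1 num2
instance (num1 : Int) (num2 : Int) (out : Int) : Decidable (Spec_calculatesum num1 num2 out) := by unfold Spec_calculatesum; infer_instance

-- ===== CLAIM (what is proved, stated in full; the proofs are below) =====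
def Claim_equal_calculatesum : Prop := ∀ (num1 : Int) (num2 : Int), Dom_calculatesum num1 num2 → Pre_calculatesum num1 num2 → Spec_calculatesum num1 num2 (calculatesum num1 num2)

-- ===== LEMMAS AND PROOFS =====

-- Common specification: digit-wise absolute-difference sum, least-significant digit first.
def dsum (a b : Nat) : Int :=
  |((a % 10 : Nat) : Int) - ((b % 10 : Nat) : Int)| +
    (if a / 10 = 0 ∧ b / 10 = 0 then 0 else dsum (a / 10) (b / 10))
termination_by a + b
decreasing_by omega

-- The decimal digit characters of n, least-significant first.
def repR (n : Nat) : List Char :=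
  Nat.digitChar (n % 10) :: (if h : n / 10 = 0 then [] else repR (n / 10))
termination_by n
decreasing_by omega

theorem repR_ne_nil (n : Nat) : repR n ≠ [] := by
  rw [repR]; simp

theorem mem_repR (n : Nat) : ∀ c ∈ repR n, ∃ d, d < 10 ∧ c = Nat.digitChar d := by
  rw [repR]
  intro c hc
  rcases List.mem_cons.mp hc with h | h
  · exact ⟨n % 10, by omega, h⟩
  · split at h
    · simp at h
    · exact mem_repR (n / 10) c h
termination_by n
decreasing_by omega

theorem digitChar_toNat (d : Nat) (hd : d < 10) : ((Nat.digitChar d).toNat : Int) - 48 = (d : Int) := by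
  interval_cases d <;> decide

theorem digitChar_not_sign (d : Nat) (hd : d < 10) :
    ¬(Nat.digitChar d = '+' ∨ Nat.digitChar d = '-') := by
  interval_cases d <;> decide

-- A-side: the loop computes dsum (given enough fuel).
theorem calcLoop_eq_dsum : ∀ (f : Nat) (a b : Nat) (s : Int), a + b < f →
    calcLoop f (a : Int) (b : Int) s = s + dsum a b := by
  intro f
  induction f with
  | zero => intro a b s h; omega
  | succ f ih =>
    intro a b s h
    have hr1 : (if (a : Int) == 0 then (0 : Int) else PySem.Int.mod (a : Int) 10)
        = ((a % 10 : Nat) : Int) := by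
      by_cases ha : a = 0
      · subst ha; simp
      · simp [ha]
    have hn1 : (if (a : Int) == 0 then (a : Int) else PySem.Int.floordiv (a : Int) 10)
        = ((a / 10 : Nat) : Int) := by
      by_cases ha : a = 0
      · subst ha; simp
      · simp [ha]
    have hr2 : (if (b : Int) == 0 then (0 : Int) else PySem.Int.mod (b : Int) 10)
        = ((b % 10 : Nat) : Int) := by
      by_cases hb : b = 0
      · subst hb; simp
      · simp [hb]
    have hn2 : (if (b : Int) == 0 then (b : Int) else PySem.Int.floordiv (b : Int) 10)
        = ((b / 10 : Nat) : Int) := by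
      by_cases hb : b = 0
      · subst hb; simp
      · simp [hb]
    rw [calcLoop]
    simp only [hr1, hn1, hr2, hn2]
    rw [dsum]
    by_cases hstop : a / 10 = 0 ∧ b / 10 = 0
    · have hb2 : (((a / 10 : Nat) : Int) == 0 && ((b / 10 : Nat) : Int) == 0) = true := by
        simp [hstop.1, hstop.2]
      simp only [hb2, if_true, if_pos hstop]
      ring
    · have hb2 : (((a / 10 : Nat) : Int) == 0 && ((b / 10 : Nat) : Int) == 0) = false := by
        rcases not_and_or.mp hstop with h1 | h1 <;> simp <;> omega
      simp only [hb2, Bool.false_eq_true, if_false, if_neg hstop]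
      rw [ih (a / 10) (b / 10) _ (by omega)]
      ring

-- B-side machinery.

-- Right-pad with '0' to width m.
def padR (xs : List Char) (m : Nat) : List Char := xs ++ List.replicate (m - xs.length) '0'

def zsum (xs ys : List Char) : Int :=
  ((xs.zip ys).map (fun p => |((p.1.toNat : Int) - 48) - ((p.2.toNat : Int) - 48)|)).sum

theorem padR_cons (x : Char) (xs : List Char) (m : Nat) :
    padR (x :: xs) m = x :: padR xs (m - 1) := by
  have h : m - (xs.length + 1) = m - 1 - xs.length := by omega
  simp [padR, h]

theorem repR_zero : repR 0 = ['0'] := by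
  rw [repR]; rfl

theorem length_repR_pos (n : Nat) : 1 ≤ (repR n).length := by
  rw [repR]; simp

theorem padR_nil (k : Nat) : padR [] k = List.replicate k '0' := by
  simp [padR]

theorem padR_zero_eq_replicate (m : Nat) (hm : 1 ≤ m) :
    padR (repR 0) m = List.replicate m '0' := by
  cases m with
  | zero => omega
  | succ k => simp [repR_zero, padR, List.replicate_succ]

theorem zsum_cons (x y : Char) (xs ys : List Char) :
    zsum (x :: xs) (y :: ys)
      = |((x.toNat : Int) - 48) - ((y.toNat : Int) - 48)| + zsum xs ys := by
  simp [zsum]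

theorem zsum_replicate_zero (m : Nat) :
    zsum (List.replicate m '0') (List.replicate m '0') = 0 := by
  induction m with
  | zero => simp [zsum]
  | succ k ih => simpa [List.replicate_succ, zsum_cons] using ih

theorem length_repR (n : Nat) :
    (repR n).length = 1 + (if n / 10 = 0 then 0 else (repR (n / 10)).length) := by
  rw [repR]
  split <;> simp [Nat.add_comm]

theorem zsum_padR_eq_dsum (a b m : Nat) (ha : (repR a).length ≤ m) (hb : (repR b).length ≤ m) :
    zsum (padR (repR a) m) (padR (repR b) m) = dsum a b := by
  have ea : repR a = Nat.digitChar (a % 10) :: (if _ : a / 10 = 0 then [] else repR (a / 10)) := by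
    rw [repR]
  have eb : repR b = Nat.digitChar (b % 10) :: (if _ : b / 10 = 0 then [] else repR (b / 10)) := by
    rw [repR]
  have hla : 1 + (if a / 10 = 0 then 0 else (repR (a / 10)).length) ≤ m := by
    rw [← length_repR]; exact ha
  have hlb : 1 + (if b / 10 = 0 then 0 else (repR (b / 10)).length) ≤ m := by
    rw [← length_repR]; exact hb
  rw [ea, eb, padR_cons, padR_cons, zsum_cons,
    digitChar_toNat _ (Nat.mod_lt _ (by norm_num)),
    digitChar_toNat _ (Nat.mod_lt _ (by norm_num)), dsum]
  by_cases h1 : a / 10 = 0 <;> by_cases h2 : b / 10 = 0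
  · rw [dif_pos h1, dif_pos h2, padR_nil, zsum_replicate_zero, if_pos ⟨h1, h2⟩]
  · have hpb : 1 ≤ (repR (b / 10)).length := length_repR_pos _
    have hm : 2 ≤ m := by rw [if_neg h2] at hlb; omega
    have t1 : (repR 0).length ≤ m - 1 := by rw [repR_zero]; simp only [List.length_cons, List.length_nil]; omega
    have t2 : (repR (b / 10)).length ≤ m - 1 := by rw [if_neg h2] at hlb; omega
    rw [dif_pos h1, dif_neg h2, padR_nil, ← padR_zero_eq_replicate (m - 1) (by omega),
      zsum_padR_eq_dsum 0 (b / 10) (m - 1) t1 t2,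
      if_neg (by tauto : ¬(a / 10 = 0 ∧ b / 10 = 0)), h1]
  · have hpa : 1 ≤ (repR (a / 10)).length := length_repR_pos _
    have hm : 2 ≤ m := by rw [if_neg h1] at hla; omega
    have t1 : (repR (a / 10)).length ≤ m - 1 := by rw [if_neg h1] at hla; omega
    have t2 : (repR 0).length ≤ m - 1 := by rw [repR_zero]; simp only [List.length_cons, List.length_nil]; omega
    rw [dif_neg h1, dif_pos h2, padR_nil, ← padR_zero_eq_replicate (m - 1) (by omega),
      zsum_padR_eq_dsum (a / 10) 0 (m - 1) t1 t2,
      if_neg (by tauto : ¬(a / 10 = 0 ∧ b / 10 = 0)), h2]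
  · have t1 : (repR (a / 10)).length ≤ m - 1 := by rw [if_neg h1] at hla; omega
    have t2 : (repR (b / 10)).length ≤ m - 1 := by rw [if_neg h2] at hlb; omega
    rw [dif_neg h1, dif_neg h2, zsum_padR_eq_dsum (a / 10) (b / 10) (m - 1) t1 t2,
      if_neg (by tauto : ¬(a / 10 = 0 ∧ b / 10 = 0))]
termination_by a + b
decreasing_by all_goals omega

theorem toDigitsCore_eq : ∀ (f n : Nat) (acc : List Char), n < f →
    Nat.toDigitsCore 10 f n acc = (repR n).reverse ++ acc := by
  intro f
  induction f with
  | zero => intro n acc h; omega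
  | succ f ih =>
    intro n acc h
    have e : repR n = Nat.digitChar (n % 10) :: (if _ : n / 10 = 0 then [] else repR (n / 10)) := by
      rw [repR]
    by_cases h0 : n / 10 = 0
    · simp [Nat.toDigitsCore, h0, e]
    · have hn : n / 10 < f := by omega
      simp only [Nat.toDigitsCore, h0, if_false]
      rw [ih (n / 10) _ hn, e]
      simp [h0]

theorem toChars_nonneg (a : Nat) : PySem.Int.toChars (a : Int) = (repR a).reverse := by
  unfold PySem.Int.toChars
  rw [if_neg (by omega : ¬((a : Int) < 0))]
  simp only [Int.toNat_natCast]
  unfold Nat.toDigits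
  rw [toDigitsCore_eq (a + 1) a [] (by omega)]
  simp

theorem zfill_eq_pad (cs : List Char) (m : Nat)
    (hne : cs ≠ []) (hdig : ∀ c ∈ cs, ∃ d, d < 10 ∧ c = Nat.digitChar d) :
    PySem.Chars.zfill cs (m : Int) = List.replicate (m - cs.length) '0' ++ cs := by
  cases cs with
  | nil => exact absurd rfl hne
  | cons c rest =>
    obtain ⟨d, hd, rfl⟩ := hdig c (by simp)
    unfold PySem.Chars.zfill
    by_cases hle : (m : Int) ≤ ((Nat.digitChar d :: rest).length : Int)
    · have h0 : m - (Nat.digitChar d :: rest).length = 0 := by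
        have := hle; push_cast at this; omega
      rw [if_pos hle, h0]
      simp
    · rw [if_neg hle]
      show (if Nat.digitChar d = '+' ∨ Nat.digitChar d = '-'
          then Nat.digitChar d ::
            (List.replicate (((m : Nat) : Int).toNat - (Nat.digitChar d :: rest).length) '0' ++ rest)
          else List.replicate (((m : Nat) : Int).toNat - (Nat.digitChar d :: rest).length) '0' ++
            Nat.digitChar d :: rest)
        = List.replicate (m - (Nat.digitChar d :: rest).length) '0' ++ Nat.digitChar d :: rest
      rw [if_neg (digitChar_not_sign d hd)]
      simp

theorem zsum_reverse (xs ys : List Char) (h : xs.length = ys.length) :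
    zsum xs ys = zsum xs.reverse ys.reverse := by
  unfold zsum
  rw [show xs.zip ys = List.zipWith Prod.mk xs ys from rfl,
    show xs.reverse.zip ys.reverse = List.zipWith Prod.mk xs.reverse ys.reverse from rfl,
    ← List.reverse_zipWith h, List.map_reverse, List.sum_reverse]

theorem alt_eq_dsum (a b : Nat) :
    calculatesum_alt (a : Int) (b : Int) = dsum a b := by
  unfold calculatesum_alt
  simp only [toChars_nonneg, List.length_reverse]
  have hmax : (max ((repR a).length : Int) ((repR b).length : Int))
      = ((max (repR a).length (repR b).length : Nat) : Int) := by
    exact_mod_cast (Nat.cast_max ..).symm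
  set M := max (repR a).length (repR b).length with hM
  have hdig1 : ∀ c ∈ (repR a).reverse, ∃ d, d < 10 ∧ c = Nat.digitChar d := by
    intro c hc; exact mem_repR a c (List.mem_reverse.mp hc)
  have hdig2 : ∀ c ∈ (repR b).reverse, ∃ d, d < 10 ∧ c = Nat.digitChar d := by
    intro c hc; exact mem_repR b c (List.mem_reverse.mp hc)
  have hne1 : (repR a).reverse ≠ [] := by simp [repR_ne_nil]
  have hne2 : (repR b).reverse ≠ [] := by simp [repR_ne_nil]
  rw [hmax, zfill_eq_pad _ M hne1 hdig1, zfill_eq_pad _ M hne2 hdig2]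
  have hla : (repR a).length ≤ M := le_max_left _ _
  have hlb : (repR b).length ≤ M := le_max_right _ _
  have hlen : (List.replicate (M - ((repR a).reverse).length) '0' ++ (repR a).reverse).length
      = (List.replicate (M - ((repR b).reverse).length) '0' ++ (repR b).reverse).length := by
    simp; omega
  have := zsum_reverse _ _ hlen
  unfold zsum at this
  rw [this]
  simp only [List.reverse_append, List.reverse_replicate, List.reverse_reverse,
    List.length_reverse]
  have e1 : repR a ++ List.replicate (M - (repR a).length) '0' = padR (repR a) M := rfl
  have e2 : repR b ++ List.replicate (M - (repR b).length) '0' = padR (repR b) M := rfl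
  rw [e1, e2]
  exact zsum_padR_eq_dsum a b M hla hlb

-- ===== VERDICT (by name: the statement is the Claim_ definition above) =====
theorem calculatesum_spec : Claim_equal_calculatesum := by
  intro num1 num2 _hdom hpre
  obtain ⟨h1, h2⟩ := hpre
  unfold Spec_calculatesum
  obtain ⟨a, rfl⟩ := Int.eq_ofNat_of_zero_le h1
  obtain ⟨b, rfl⟩ := Int.eq_ofNat_of_zero_le h2
  rw [alt_eq_dsum]
  unfold calculatesum
  have := calcLoop_eq_dsum ((a : Int).natAbs + (b : Int).natAbs + 1) a b 0
    (by simp only [Int.natAbs_natCast]; omega)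
  simpa using this
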